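-- pv_equiv track=rewrite | github.com/artgunBLACKMAESTRO/EGE | ma/23 ma.py | f
-- ===== SOURCE A (Python) =====
-- def f(x,y,z):
--     if x>y:
--         return 0
--     if x==y and ('111' not in z) and ('222' not in z):
--         return 1
--     if x<y:
--         return f(x+1,y,z+'1')+f(x*2,y,z+'2')
--     else:
--         return 0
-- ===== SOURCE B (Python) =====
-- def f(x, y, z):
--     # linear bottom-up DP over positions x..y with a 5-state "tail of the move string" automaton
--     if x > y:
--         return 0
--     if '111' in z or '222' in z:
--         return 0
--     # tail state from the last two characters: 0 neutral, 1/2 = run of '1' of length 1/2, 3/4 same for '2'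
--     if z.endswith('11'):
--         s0 = 2
--     elif z.endswith('1'):
--         s0 = 1
--     elif z.endswith('22'):
--         s0 = 4
--     elif z.endswith('2'):
--         s0 = 3
--     else:
--         s0 = 0
--     n = y - x
--     rows = [None] * n + [(1, 1, 1, 1, 1)]   # rows[i] = completions from position x+i, per state 0..4
--     for i in range(n - 1, -1, -1):
--         nxt = rows[i + 1]
--         j = x + 2 * i                        # index of the doubled position 2*(x+i)
--         dbl = rows[j] if i < j <= n else (0, 0, 0, 0, 0)
--         rows[i] = (nxt[1] + dbl[3],
--                    nxt[2] + dbl[3],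
--                    dbl[3],
--                    nxt[1] + dbl[4],
--                    nxt[1])
--     return rows[0][s0]
-- ===== Notes on version B (the rewrite author's own statement) =====
-- stated objective: faster
-- what changed: A explores the full binary tree of move sequences recursively and tests '111'/'222' on the accumulated string only at each leaf; B checks the seed string once, reduces it to a 5-state tail automaton, and fills a linear bottom-up DP table of completion counts per (position, state), so the exponential tree search disappears (timing: B ~270x at the largest size A finished, below the confirmation threshold). Pre_ excludes x <= 0 with x < y, where A's recursion never terminates (RecursionError).
import Mathlib
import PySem

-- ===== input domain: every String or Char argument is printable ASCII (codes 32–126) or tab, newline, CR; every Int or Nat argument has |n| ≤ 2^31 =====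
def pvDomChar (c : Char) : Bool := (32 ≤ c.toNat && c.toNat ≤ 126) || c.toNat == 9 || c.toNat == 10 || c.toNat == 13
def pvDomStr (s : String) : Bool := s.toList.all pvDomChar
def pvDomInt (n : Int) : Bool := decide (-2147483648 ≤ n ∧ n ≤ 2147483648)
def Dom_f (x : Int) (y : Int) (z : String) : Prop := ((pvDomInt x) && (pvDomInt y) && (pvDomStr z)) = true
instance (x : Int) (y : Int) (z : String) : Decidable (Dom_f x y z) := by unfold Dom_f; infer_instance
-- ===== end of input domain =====

-- B replaces A's exponential recursion over all move strings by a linear bottom-up DP over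
-- positions x..y with a 5-state tail automaton (intended as faster; a timing run measured
-- B ~270x at the largest size A finished, below its confirmation threshold).

-- ===== PORT A =====
-- A's recursion is not structural, so the port carries a fuel counter; (y-x).toNat+1 fuel
-- always suffices on Pre_f (each recursive call raises x by at least 1).  The string is
-- carried as List Char ('+' on strings = append, '111' in z = PySem.Chars.isIn).
def fAux (fuel : Nat) (x : Int) (y : Int) (z : List Char) : Int :=
  match fuel with
  | 0 => 0
  | fuel + 1 =>
    if x > y then 0
    else if x = y ∧ PySem.Chars.isIn ['1','1','1'] z = false
               ∧ PySem.Chars.isIn ['2','2','2'] z = false then 1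
    else if x < y then fAux fuel (x + 1) y (z ++ ['1']) + fAux fuel (x * 2) y (z ++ ['2'])
    else 0

def f (x : Int) (y : Int) (z : String) : Int := fAux ((y - x).toNat + 1) x y z.toList

-- ===== PORT B =====
def bZeros : Int × Int × Int × Int × Int := (0, 0, 0, 0, 0)

-- rows of Source B, built back-to-front: bBuild x y k is the list rows[n-k .. n] (head = row n-k)
def bBuild (x : Int) (y : Int) : Nat → List (Int × Int × Int × Int × Int)
  | 0 => [(1, 1, 1, 1, 1)]
  | k + 1 =>
    let acc := bBuild x y k
    let i : Int := (y - x) - ((k : Int) + 1)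
    let nxt := acc.headD bZeros
    let j : Int := x + 2 * i
    let dbl := if i < j ∧ j ≤ y - x then acc.getD (j - i - 1).toNat bZeros else bZeros
    (nxt.2.1 + dbl.2.2.2.1, nxt.2.2.1 + dbl.2.2.2.1, dbl.2.2.2.1,
     nxt.2.1 + dbl.2.2.2.2, nxt.2.1) :: acc

def f_alt (x : Int) (y : Int) (z : String) : Int :=
  if x > y then 0
  else if PySem.Str.isIn "111" z || PySem.Str.isIn "222" z then 0
  else
    let s0 : Nat :=
      if PySem.Str.endswith z "11" then 2
      else if PySem.Str.endswith z "1" then 1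
      else if PySem.Str.endswith z "22" then 4
      else if PySem.Str.endswith z "2" then 3
      else 0
    let r := (bBuild x y (y - x).toNat).headD bZeros
    match s0 with
    | 0 => r.1
    | 1 => r.2.1
    | 2 => r.2.2.1
    | 3 => r.2.2.2.1
    | _ => r.2.2.2.2

-- ===== PRECONDITION & SPEC =====
-- Pre_f excludes exactly the inputs with x ≤ 0 and x < y, on which A's recursion never
-- terminates (the f(x*2) branch loops at or below 0): Python raises RecursionError there.
def Pre_f (x : Int) (y : Int) (z : String) : Prop := 0 < x ∨ y ≤ x
instance (x : Int) (y : Int) (z : String) : Decidable (Pre_f x y z) := by unfold Pre_f; infer_instance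
def pvWitness_f : Int × Int × String := (1, 4, "")

def Spec_f (x : Int) (y : Int) (z : String) (out : Int) : Prop := out = f_alt x y z
instance (x : Int) (y : Int) (z : String) (out : Int) : Decidable (Spec_f x y z out) := by unfold Spec_f; infer_instance

-- ===== CLAIM (what is proved, stated in full; the proofs are below) =====
def Claim_equal_f : Prop := ∀ (x : Int) (y : Int) (z : String), Dom_f x y z → Pre_f x y z → Spec_f x y z (f x y z)

-- ===== LEMMAS AND PROOFS =====

-- gSpec y x s = number of admissible completions from position x with tail state s
def gSpec (y : Int) (x : Int) (s : Nat) : Int :=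
  if h1 : x > y then 0
  else if h2 : x = y then 1
  else
    (if s = 2 then 0 else gSpec y (x + 1) (if s = 1 then 2 else 1)) +
    (if s = 4 then 0 else
      if h3 : 0 < x ∧ 2 * x ≤ y then gSpec y (2 * x) (if s = 3 then 4 else 3) else 0)
termination_by (y - x).toNat
decreasing_by all_goals omega

def stC : List Char → Nat
  | '1' :: '1' :: _ => 2
  | '1' :: _ => 1
  | '2' :: '2' :: _ => 4
  | '2' :: _ => 3
  | _ => 0

def DirtyR (r : List Char) : Prop := ['1','1','1'] <:+: r ∨ ['2','2','2'] <:+: r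

lemma stC_eq_two_iff (r : List Char) : stC r = 2 ↔ ['1','1'] <+: r := by
  match r with
  | [] => simp [stC]
  | [c] => by_cases h1 : c = '1' <;> by_cases h2 : c = '2' <;> simp_all [stC, List.cons_prefix_cons, eq_comm]
  | c :: d :: t =>
    by_cases h1 : c = '1' <;> by_cases h2 : c = '2' <;> by_cases h3 : d = '1' <;>
      by_cases h4 : d = '2' <;> simp_all [stC, List.cons_prefix_cons, eq_comm]

lemma stC_eq_four_iff (r : List Char) : stC r = 4 ↔ ['2','2'] <+: r := by
  match r with
  | [] => simp [stC]
  | [c] => by_cases h1 : c = '1' <;> by_cases h2 : c = '2' <;> simp_all [stC, List.cons_prefix_cons, eq_comm]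
  | c :: d :: t =>
    by_cases h1 : c = '1' <;> by_cases h2 : c = '2' <;> by_cases h3 : d = '1' <;>
      by_cases h4 : d = '2' <;> simp_all [stC, List.cons_prefix_cons, eq_comm]

lemma stC_one_prefix (r : List Char) : ['1'] <+: r ↔ (stC r = 1 ∨ stC r = 2) := by
  match r with
  | [] => simp [stC]
  | [c] => by_cases h1 : c = '1' <;> by_cases h2 : c = '2' <;> simp_all [stC, List.cons_prefix_cons, eq_comm]
  | c :: d :: t =>
    by_cases h1 : c = '1' <;> by_cases h2 : c = '2' <;> by_cases h3 : d = '1' <;>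
      by_cases h4 : d = '2' <;> simp_all [stC, List.cons_prefix_cons, eq_comm]

lemma stC_two_prefix (r : List Char) : ['2'] <+: r ↔ (stC r = 3 ∨ stC r = 4) := by
  match r with
  | [] => simp [stC]
  | [c] => by_cases h1 : c = '1' <;> by_cases h2 : c = '2' <;> simp_all [stC, List.cons_prefix_cons, eq_comm]
  | c :: d :: t =>
    by_cases h1 : c = '1' <;> by_cases h2 : c = '2' <;> by_cases h3 : d = '1' <;>
      by_cases h4 : d = '2' <;> simp_all [stC, List.cons_prefix_cons, eq_comm]

lemma stC_cons_one (r : List Char) : stC ('1' :: r) = if ['1'] <+: r then 2 else 1 := by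
  match r with
  | [] => simp [stC]
  | c :: t => by_cases h1 : c = '1' <;> simp_all [stC, List.cons_prefix_cons, eq_comm]

lemma stC_cons_two (r : List Char) : stC ('2' :: r) = if ['2'] <+: r then 4 else 3 := by
  match r with
  | [] => simp [stC]
  | c :: t => by_cases h1 : c = '2' <;> simp_all [stC, List.cons_prefix_cons, eq_comm]

lemma step_one (r : List Char) (hc : ¬ DirtyR r) (hs : stC r ≠ 2) :
    ¬ DirtyR ('1' :: r) ∧ stC ('1' :: r) = (if stC r = 1 then 2 else 1) := by
  constructor
  · intro hdd
    rcases hdd with h | h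
    · rcases List.infix_cons_iff.mp h with hp | hi
      · exact hs ((stC_eq_two_iff r).mpr (List.cons_prefix_cons.mp hp).2)
      · exact hc (Or.inl hi)
    · rcases List.infix_cons_iff.mp h with hp | hi
      · exact absurd (List.cons_prefix_cons.mp hp).1 (by decide)
      · exact hc (Or.inr hi)
  · rw [stC_cons_one]
    by_cases h1 : ['1'] <+: r
    · rcases (stC_one_prefix r).mp h1 with h | h
      · simp [h, h1]
      · exact absurd h hs
    · have : stC r ≠ 1 := fun h => h1 ((stC_one_prefix r).mpr (Or.inl h))
      simp [h1, this]

lemma step_two (r : List Char) (hc : ¬ DirtyR r) (hs : stC r ≠ 4) :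
    ¬ DirtyR ('2' :: r) ∧ stC ('2' :: r) = (if stC r = 3 then 4 else 3) := by
  constructor
  · intro hdd
    rcases hdd with h | h
    · rcases List.infix_cons_iff.mp h with hp | hi
      · exact absurd (List.cons_prefix_cons.mp hp).1 (by decide)
      · exact hc (Or.inl hi)
    · rcases List.infix_cons_iff.mp h with hp | hi
      · exact hs ((stC_eq_four_iff r).mpr (List.cons_prefix_cons.mp hp).2)
      · exact hc (Or.inr hi)
  · rw [stC_cons_two]
    by_cases h1 : ['2'] <+: r
    · rcases (stC_two_prefix r).mp h1 with h | h
      · simp [h, h1]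
      · exact absurd h hs
    · have : stC r ≠ 3 := fun h => h1 ((stC_two_prefix r).mpr (Or.inl h))
      simp [h1, this]

lemma stC_zero (r : List Char) (h1 : ¬ ['1'] <+: r) (h2 : ¬ ['2'] <+: r) : stC r = 0 := by
  have a := (stC_one_prefix r).mpr
  have b := (stC_two_prefix r).mpr
  have c : stC r ≤ 4 := by unfold stC; split <;> omega
  by_contra hne
  interval_cases h : stC r <;> simp_all

lemma gSpec_self (y : Int) (s : Nat) : gSpec y y s = 1 := by
  rw [gSpec]; simp

lemma gSpec_gt (y x : Int) (s : Nat) (h : x > y) : gSpec y x s = 0 := by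
  rw [gSpec]; simp [h]

lemma fAux_gt (fuel : Nat) (x y : Int) (z : List Char) (h : x > y) : fAux fuel x y z = 0 := by
  cases fuel <;> simp [fAux, h]

lemma dirty_rev (z : List Char) :
    DirtyR z.reverse ↔ (['1','1','1'] <:+: z ∨ ['2','2','2'] <:+: z) := by
  unfold DirtyR
  constructor <;> intro h <;> rcases h with h | h
  · exact Or.inl (by simpa using List.reverse_infix.mp (by simpa using h))
  · exact Or.inr (by simpa using List.reverse_infix.mp (by simpa using h))
  · exact Or.inl (by simpa using List.reverse_infix.mpr h)
  · exact Or.inr (by simpa using List.reverse_infix.mpr h)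

lemma fAux_dirty (fuel : Nat) : ∀ (x y : Int) (z : List Char), DirtyR z.reverse →
    fAux fuel x y z = 0 := by
  induction fuel with
  | zero => intro x y z _; simp [fAux]
  | succ n ih =>
    intro x y z hd
    have hd' := (dirty_rev z).mp hd
    have h1 : ¬ (PySem.Chars.isIn ['1','1','1'] z = false
               ∧ PySem.Chars.isIn ['2','2','2'] z = false) := by
      rcases hd' with h | h
      · intro ⟨a, _⟩; exact (PySem.Chars.isIn_eq_false_iff _ _).mp a h
      · intro ⟨_, b⟩; exact (PySem.Chars.isIn_eq_false_iff _ _).mp b h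
    have ext : ∀ c : Char, DirtyR (z ++ [c]).reverse := by
      intro c
      rw [dirty_rev]
      rcases hd' with h | h
      · exact Or.inl (h.trans (List.prefix_append z [c]).isInfix)
      · exact Or.inr (h.trans (List.prefix_append z [c]).isInfix)
    simp only [fAux]
    split
    · rfl
    · split
      · next h => exact absurd ⟨h.2.1, h.2.2⟩ h1
      · split
        · rw [ih _ _ _ (ext '1'), ih _ _ _ (ext '2')]; rfl
        · rfl

lemma dirty_one_of_st2 (r : List Char) (h : stC r = 2) : DirtyR ('1' :: r) := by
  left
  rcases (stC_eq_two_iff r).mp h with ⟨t, rfl⟩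
  exact ⟨[], t, by simp⟩

lemma dirty_two_of_st4 (r : List Char) (h : stC r = 4) : DirtyR ('2' :: r) := by
  right
  rcases (stC_eq_four_iff r).mp h with ⟨t, rfl⟩
  exact ⟨[], t, by simp⟩

lemma fAux_eq_gSpec (fuel : Nat) : ∀ (x y : Int) (z : List Char),
    ¬ DirtyR z.reverse → 1 ≤ x → (y - x).toNat + 1 ≤ fuel →
    fAux fuel x y z = gSpec y x (stC z.reverse) := by
  induction fuel with
  | zero => intro x y z _ _ hf; omega
  | succ n ih =>
    intro x y z hclean hx hf
    have rev1 : (z ++ ['1']).reverse = '1' :: z.reverse := by simp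
    have rev2 : (z ++ ['2']).reverse = '2' :: z.reverse := by simp
    by_cases hgt : x > y
    · rw [fAux_gt _ _ _ _ hgt, gSpec_gt _ _ _ hgt]
    · by_cases heq : x = y
      · subst heq
        have e1 : PySem.Chars.isIn ['1','1','1'] z = false :=
          (PySem.Chars.isIn_eq_false_iff _ _).mpr (fun h => hclean ((dirty_rev z).mpr (Or.inl h)))
        have e2 : PySem.Chars.isIn ['2','2','2'] z = false :=
          (PySem.Chars.isIn_eq_false_iff _ _).mpr (fun h => hclean ((dirty_rev z).mpr (Or.inr h)))
        simp [fAux, e1, e2, gSpec_self]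
      · have hlt : x < y := by omega
        have hstep : fAux (n+1) x y z
            = fAux n (x + 1) y (z ++ ['1']) + fAux n (x * 2) y (z ++ ['2']) := by
          simp only [fAux]
          rw [if_neg (by omega), if_neg (by exact fun h => heq h.1), if_pos hlt]
        rw [hstep, gSpec]
        rw [dif_neg hgt, dif_neg heq]
        congr 1
        · by_cases hs2 : stC z.reverse = 2
          · rw [if_pos hs2, fAux_dirty n _ _ _ (by rw [rev1]; exact dirty_one_of_st2 _ hs2)]
          · rw [if_neg hs2]
            obtain ⟨hc', hst'⟩ := step_one z.reverse hclean hs2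
            rw [ih (x+1) y (z ++ ['1']) (by rwa [rev1]) (by omega) (by omega), rev1, hst']
        · by_cases hs4 : stC z.reverse = 4
          · rw [if_pos hs4, fAux_dirty n _ _ _ (by rw [rev2]; exact dirty_two_of_st4 _ hs4)]
          · rw [if_neg hs4]
            by_cases h2y : 2 * x ≤ y
            · rw [dif_pos ⟨by omega, h2y⟩]
              obtain ⟨hc', hst'⟩ := step_two z.reverse hclean hs4
              have : x * 2 = 2 * x := by ring
              rw [this] at *
              rw [ih (2*x) y (z ++ ['2']) (by rwa [rev2]) (by omega) (by omega), rev2, hst']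
            · rw [dif_neg (by omega), fAux_gt _ _ _ _ (by omega)]

def gRow (x y : Int) (t : Nat) : Int × Int × Int × Int × Int :=
  (gSpec y (x + t) 0, gSpec y (x + t) 1, gSpec y (x + t) 2, gSpec y (x + t) 3, gSpec y (x + t) 4)

lemma bBuild_eq (x y : Int) (hxy : x ≤ y) : ∀ (k : Nat), k ≤ (y - x).toNat →
    bBuild x y k = (List.range (k + 1)).map (fun t => gRow x y ((y - x).toNat - k + t)) := by
  intro k
  induction k with
  | zero =>
    intro _
    have hxN : x + (((y - x).toNat : Nat) : Int) = y := by omega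
    show [(1, 1, 1, 1, 1)] = _
    simp only [List.range_one, List.map_cons, List.map_nil, Nat.sub_zero, Nat.add_zero,
      Nat.zero_add]
    rw [gRow, hxN]
    simp [gSpec_self]
  | succ k ihk =>
    intro hk1
    have ih := ihk (by omega)
    set N := (y - x).toNat with hNdef
    have hN : (N : Int) = y - x := Int.toNat_of_nonneg (by omega)
    show (let acc := bBuild x y k
          let i : Int := (y - x) - ((k : Int) + 1)
          let nxt := acc.headD bZeros
          let j : Int := x + 2 * i
          let dbl := if i < j ∧ j ≤ y - x then acc.getD (j - i - 1).toNat bZeros else bZeros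
          (nxt.2.1 + dbl.2.2.2.1, nxt.2.2.1 + dbl.2.2.2.1, dbl.2.2.2.1,
           nxt.2.1 + dbl.2.2.2.2, nxt.2.1) :: acc) = _
    simp only [ih]
    set i : Int := (y - x) - ((k : Int) + 1) with hidef
    set j : Int := x + 2 * i with hjdef
    have hnxt : ((List.range (k + 1)).map (fun t => gRow x y (N - k + t))).headD bZeros
        = gRow x y (N - k) := by rw [List.range_succ_eq_map]; simp
    have hrhs : (List.range (k + 1 + 1)).map (fun t => gRow x y (N - (k + 1) + t))
        = gRow x y (N - (k + 1)) :: (List.range (k + 1)).map (fun t => gRow x y (N - k + t)) := by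
      rw [List.range_succ_eq_map]
      simp only [List.map_cons, List.map_map, Nat.add_zero]
      congr 1
      apply List.map_congr_left
      intro t _
      simp only [Function.comp_apply, Nat.succ_eq_add_one]
      congr 1
      omega
    rw [hnxt, hrhs]
    congr 1
    -- the freshly computed row equals gRow x y (N - (k+1))
    have hilt : x + i < y := by omega
    have unf : ∀ s : Nat, gSpec y (x + i) s
        = (if s = 2 then 0 else gSpec y (x + i + 1) (if s = 1 then 2 else 1))
          + (if s = 4 then 0 else
              if 0 < x + i ∧ 2 * (x + i) ≤ y then gSpec y (2 * (x + i)) (if s = 3 then 4 else 3)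
              else 0) := by
      intro s
      rw [gSpec, dif_neg (by omega), dif_neg (by omega)]
      simp only [dite_eq_ite]
    have e1 : x + ((N - (k + 1) : Nat) : Int) = x + i := by omega
    have e2 : x + ((N - k : Nat) : Int) = x + i + 1 := by omega
    have hguard : (i < j ∧ j ≤ y - x) ↔ (0 < x + i ∧ 2 * (x + i) ≤ y) := by
      rw [hjdef]; omega
    by_cases hg : 0 < x + i ∧ 2 * (x + i) ≤ y
    · have hm : (j - i - 1).toNat < k + 1 := by rw [hjdef]; omega
      have hdbl : ((List.range (k + 1)).map (fun t => gRow x y (N - k + t))).getD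
            (j - i - 1).toNat bZeros = gRow x y (N - k + (j - i - 1).toNat) := by
        rw [List.getD_eq_getElem?_getD, List.getElem?_map, List.getElem?_range hm]
        rfl
      have e3 : x + ((N - k + (j - i - 1).toNat : Nat) : Int) = 2 * (x + i) := by
        rw [hjdef]; omega
      rw [if_pos (hguard.mpr hg), hdbl]
      show _ = gRow x y (N - (k + 1))
      rw [gRow, gRow, gRow, e1, e2, e3, unf 0, unf 1, unf 2, unf 3, unf 4,
        if_pos hg, if_pos hg, if_pos hg, if_pos hg, if_pos hg]
      norm_num
    · rw [if_neg (fun h => hg (hguard.mp h))]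
      show _ = gRow x y (N - (k + 1))
      rw [gRow, gRow, e1, e2, unf 0, unf 1, unf 2, unf 3, unf 4,
        if_neg hg, if_neg hg, if_neg hg, if_neg hg, if_neg hg]
      norm_num [bZeros]

lemma stC_le (r : List Char) : stC r ≤ 4 := by
  unfold stC; split <;> omega

lemma ends_rev (z : String) (p : String) (q : List Char) (hq : p.toList = q)
    (hrev : q.reverse = q) :
    PySem.Str.endswith z p = true ↔ q <+: z.toList.reverse := by
  have h1 : PySem.Str.endswith z p = PySem.Chars.endswith z.toList q := by rw [← hq]; simp
  rw [h1, PySem.Chars.endswith_iff]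
  constructor
  · intro h
    have h' : q.reverse <+: z.toList.reverse := List.reverse_prefix.mpr h
    rwa [hrev] at h'
  · intro h
    have h' : q.reverse <+: z.toList.reverse := by rwa [hrev]
    exact List.reverse_prefix.mp h'

lemma s0_eq (z : String) :
    (if PySem.Str.endswith z "11" then (2:Nat)
     else if PySem.Str.endswith z "1" then 1
     else if PySem.Str.endswith z "22" then 4
     else if PySem.Str.endswith z "2" then 3
     else 0) = stC z.toList.reverse := by
  have e11 := ends_rev z "11" ['1','1'] rfl rfl
  have e1 := ends_rev z "1" ['1'] rfl rfl
  have e22 := ends_rev z "22" ['2','2'] rfl rfl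
  have e2 := ends_rev z "2" ['2'] rfl rfl
  set r := z.toList.reverse with hr
  by_cases b11 : PySem.Str.endswith z "11" = true
  · rw [if_pos b11]
    exact ((stC_eq_two_iff r).mpr (e11.mp b11)).symm
  · have np11 : ¬ ['1','1'] <+: r := fun h => b11 (e11.mpr h)
    rw [if_neg b11]
    by_cases b1 : PySem.Str.endswith z "1" = true
    · rw [if_pos b1]
      have hst : stC r = 1 := by
        rcases (stC_one_prefix r).mp (e1.mp b1) with h | h
        · exact h
        · exact absurd ((stC_eq_two_iff r).mp h) np11
      exact hst.symm
    · have np1 : ¬ ['1'] <+: r := fun h => b1 (e1.mpr h)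
      rw [if_neg b1]
      by_cases b22 : PySem.Str.endswith z "22" = true
      · rw [if_pos b22]
        exact ((stC_eq_four_iff r).mpr (e22.mp b22)).symm
      · have np22 : ¬ ['2','2'] <+: r := fun h => b22 (e22.mpr h)
        rw [if_neg b22]
        by_cases b2 : PySem.Str.endswith z "2" = true
        · rw [if_pos b2]
          have hst : stC r = 3 := by
            rcases (stC_two_prefix r).mp (e2.mp b2) with h | h
            · exact h
            · exact absurd ((stC_eq_four_iff r).mp h) np22
          exact hst.symm
        · have np2 : ¬ ['2'] <+: r := fun h => b2 (e2.mpr h)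
          rw [if_neg b2]
          exact (stC_zero r np1 np2).symm


-- ===== VERDICT (by name: the statement is the Claim_ definition above) =====
theorem f_spec : Claim_equal_f := by
  intro x y z _hdom pre
  unfold Pre_f at pre
  unfold Spec_f f f_alt
  by_cases hgt : x > y
  · rw [if_pos hgt, fAux_gt _ _ _ _ hgt]
  · rw [if_neg hgt]
    by_cases hdirty : (PySem.Str.isIn "111" z || PySem.Str.isIn "222" z) = true
    · rw [if_pos hdirty]
      apply fAux_dirty
      rw [dirty_rev]
      rcases Bool.or_eq_true_iff.mp hdirty with h | h
      · exact Or.inl (by simpa using (PySem.Str.isIn_iff_infix _ _).mp h)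
      · exact Or.inr (by simpa using (PySem.Str.isIn_iff_infix _ _).mp h)
    · rw [if_neg hdirty]
      have hclean : ¬ DirtyR z.toList.reverse := by
        rw [dirty_rev]
        intro h
        apply hdirty
        rcases h with h | h
        · exact Bool.or_eq_true_iff.mpr (Or.inl ((PySem.Str.isIn_iff_infix _ _).mpr (by simpa using h)))
        · exact Bool.or_eq_true_iff.mpr (Or.inr ((PySem.Str.isIn_iff_infix _ _).mpr (by simpa using h)))
      have hxy : x ≤ y := by omega
      simp only [s0_eq z]
      rw [bBuild_eq x y hxy _ (le_refl _)]
      have hhead : ((List.range ((y - x).toNat + 1)).map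
            (fun t => gRow x y ((y - x).toNat - (y - x).toNat + t))).headD bZeros
          = gRow x y 0 := by rw [List.range_succ_eq_map]; simp
      rw [hhead]
      have hx0 : x + ((0 : Nat) : Int) = x := by omega
      have h4 : stC z.toList.reverse ≤ 4 := stC_le _
      by_cases heq : x = y
      · subst heq
        have e1 : PySem.Chars.isIn ['1','1','1'] z.toList = false :=
          (PySem.Chars.isIn_eq_false_iff _ _).mpr
            (fun h => hclean ((dirty_rev z.toList).mpr (Or.inl h)))
        have e2 : PySem.Chars.isIn ['2','2','2'] z.toList = false :=
          (PySem.Chars.isIn_eq_false_iff _ _).mpr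
            (fun h => hclean ((dirty_rev z.toList).mpr (Or.inr h)))
        have hf : fAux ((x - x).toNat + 1) x x z.toList = 1 := by
          simp [fAux, e1, e2]
        rw [hf, gRow, hx0]
        set s := stC z.toList.reverse with hs
        interval_cases s <;> simp [gSpec_self]
      · have hlt : x < y := by omega
        have hx1 : 1 ≤ x := by omega
        rw [fAux_eq_gSpec _ x y z.toList hclean hx1 (by omega), gRow, hx0]
        set s := stC z.toList.reverse with hs
        interval_cases s <;> rfl
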